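-- pv_equiv track=rewrite | github.com/ishita7077/runpod_braindiff_test | backend/telemetry_store.py | _stage_label
-- ===== SOURCE A (Python) =====
-- from typing import Any
--
-- def _stage_label(stage_times: dict[str, Any]) -> str:
--     if not stage_times:
--         return "The run stopped before BrainDiff recorded a processing step."
--     if any(k.startswith("predict_b") for k in stage_times):
--         return "It reached the second file's brain-model prediction step."
--     if any(k.startswith("events_b") for k in stage_times):
--         return "It reached the second file's transcript/alignment step."
--     if any(k.startswith("predict_a") for k in stage_times):
--         return "It reached the first file's brain-model prediction step."
--     if any(k.startswith("events_a") for k in stage_times):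
--         return "It reached the first file's transcript/alignment step."
--     if "score_diff_ms" in stage_times or "heatmap_ms" in stage_times:
--         return "It reached final scoring and brain-map rendering."
--     return "It started processing, but did not record enough detail to identify the exact step."
-- ===== SOURCE B (Python) =====
-- def _stage_label(stage_times: dict) -> str:
--     if not stage_times:
--         return "The run stopped before BrainDiff recorded a processing step."
--
--     def rank(k: str) -> int:
--         if k.startswith("predict_b"):
--             return 5
--         if k.startswith("events_b"):
--             return 4
--         if k.startswith("predict_a"):
--             return 3
--         if k.startswith("events_a"):
--             return 2
--         if k in ("score_diff_ms", "heatmap_ms"):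
--             return 1
--         return 0
--
--     best = 0
--     for k in stage_times:
--         best = max(best, rank(k))
--     return {
--         5: "It reached the second file's brain-model prediction step.",
--         4: "It reached the second file's transcript/alignment step.",
--         3: "It reached the first file's brain-model prediction step.",
--         2: "It reached the first file's transcript/alignment step.",
--         1: "It reached final scoring and brain-map rendering.",
--     }.get(best, "It started processing, but did not record enough detail to identify the exact step.")
-- ===== Notes on version B (the rewrite author's own statement) =====
-- stated objective: alternative
-- what changed: Replaced the six-way if/elif chain of repeated any()-scans over the keys with a single pass that maintains the maximum stage rank seen, followed by a rank->message table lookup.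
import Mathlib
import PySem

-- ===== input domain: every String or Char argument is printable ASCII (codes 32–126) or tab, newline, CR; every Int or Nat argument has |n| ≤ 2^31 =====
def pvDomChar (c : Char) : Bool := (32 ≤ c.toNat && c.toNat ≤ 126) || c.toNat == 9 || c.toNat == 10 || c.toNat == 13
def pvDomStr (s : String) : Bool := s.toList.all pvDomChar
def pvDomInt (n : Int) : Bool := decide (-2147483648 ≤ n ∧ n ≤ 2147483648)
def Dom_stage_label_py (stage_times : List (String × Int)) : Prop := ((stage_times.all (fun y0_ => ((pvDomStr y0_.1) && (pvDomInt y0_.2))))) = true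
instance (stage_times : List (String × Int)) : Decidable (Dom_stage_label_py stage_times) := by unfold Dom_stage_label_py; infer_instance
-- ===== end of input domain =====

-- B replaces A's chain of five any()-scans over the keys by one pass keeping the maximum
-- stage rank, then a rank -> message table lookup (objective: alternative decomposition).

-- ===== PORT A =====
def stage_label_py (stage_times : List (String × Int)) : String :=
  if stage_times = [] then
    "The run stopped before BrainDiff recorded a processing step."
  else if stage_times.any (fun kv => PySem.Str.startswith kv.1 "predict_b") then
    "It reached the second file's brain-model prediction step."
  else if stage_times.any (fun kv => PySem.Str.startswith kv.1 "events_b") then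
    "It reached the second file's transcript/alignment step."
  else if stage_times.any (fun kv => PySem.Str.startswith kv.1 "predict_a") then
    "It reached the first file's brain-model prediction step."
  else if stage_times.any (fun kv => PySem.Str.startswith kv.1 "events_a") then
    "It reached the first file's transcript/alignment step."
  else if stage_times.any (fun kv => kv.1 == "score_diff_ms") || stage_times.any (fun kv => kv.1 == "heatmap_ms") then
    "It reached final scoring and brain-map rendering."
  else
    "It started processing, but did not record enough detail to identify the exact step."

-- ===== PORT B =====
def pvRank (k : String) : Int :=
  if PySem.Str.startswith k "predict_b" then 5
  else if PySem.Str.startswith k "events_b" then 4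
  else if PySem.Str.startswith k "predict_a" then 3
  else if PySem.Str.startswith k "events_a" then 2
  else if k == "score_diff_ms" || k == "heatmap_ms" then 1
  else 0

def stage_label_py_alt (stage_times : List (String × Int)) : String :=
  if stage_times = [] then
    "The run stopped before BrainDiff recorded a processing step."
  else
    let best := stage_times.foldl (fun m kv => max m (pvRank kv.1)) 0
    (PySem.Dict.ofList
      [((5 : Int), "It reached the second file's brain-model prediction step."),
       (4, "It reached the second file's transcript/alignment step."),
       (3, "It reached the first file's brain-model prediction step."),
       (2, "It reached the first file's transcript/alignment step."),
       (1, "It reached final scoring and brain-map rendering.")]).getD best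
      "It started processing, but did not record enough detail to identify the exact step."

-- ===== PRECONDITION & SPEC =====
def Spec_stage_label_py (stage_times : List (String × Int)) (out : String) : Prop := out = stage_label_py_alt stage_times
instance (stage_times : List (String × Int)) (out : String) : Decidable (Spec_stage_label_py stage_times out) := by unfold Spec_stage_label_py; infer_instance

-- ===== CLAIM (what is proved, stated in full; the proofs are below) =====
def Claim_equal_stage_label_py : Prop := ∀ (stage_times : List (String × Int)), Dom_stage_label_py stage_times → Spec_stage_label_py stage_times (stage_label_py stage_times)

-- ===== LEMMAS AND PROOFS =====

-- the value A's if/elif chain selects, as an Int rank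
def pvChain (l : List (String × Int)) : Int :=
  if l.any (fun kv => PySem.Str.startswith kv.1 "predict_b") then 5
  else if l.any (fun kv => PySem.Str.startswith kv.1 "events_b") then 4
  else if l.any (fun kv => PySem.Str.startswith kv.1 "predict_a") then 3
  else if l.any (fun kv => PySem.Str.startswith kv.1 "events_a") then 2
  else if l.any (fun kv => kv.1 == "score_diff_ms") || l.any (fun kv => kv.1 == "heatmap_ms") then 1
  else 0

theorem pvChain_nonneg (l : List (String × Int)) : 0 ≤ pvChain l := by
  unfold pvChain; split_ifs <;> omega

theorem pvBoolChain : ∀ (b5 b4 b3 b2 bs bh a5 a4 a3 a2 as' ah : Bool),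
    (if (b5 || a5) then (5:Int) else if (b4 || a4) then 4 else if (b3 || a3) then 3
     else if (b2 || a2) then 2 else if ((bs || as') || (bh || ah)) then 1 else 0)
  = max (if b5 then (5:Int) else if b4 then 4 else if b3 then 3 else if b2 then 2
         else if (bs || bh) then 1 else 0)
        (if a5 then (5:Int) else if a4 then 4 else if a3 then 3 else if a2 then 2
         else if (as' || ah) then 1 else 0) := by decide

theorem pvChain_cons (x : String × Int) (xs : List (String × Int)) :
    pvChain (x :: xs) = max (pvRank x.1) (pvChain xs) := by
  unfold pvChain pvRank
  simp only [List.any_cons]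
  exact pvBoolChain _ _ _ _ _ _ _ _ _ _ _ _

theorem pvRank_nonneg (k : String) : 0 ≤ pvRank k := by
  unfold pvRank; split_ifs <;> omega

theorem pvFold_eq_chain (l : List (String × Int)) (a : Int) (ha : 0 ≤ a) :
    l.foldl (fun m kv => max m (pvRank kv.1)) a = max a (pvChain l) := by
  induction l generalizing a with
  | nil => simp [pvChain]; omega
  | cons x xs ih =>
      rw [List.foldl_cons, ih (max a (pvRank x.1)) (by have := pvRank_nonneg x.1; omega),
          pvChain_cons]
      omega

-- ===== VERDICT (by name: the statement is the Claim_ definition above) =====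
theorem stage_label_py_spec : Claim_equal_stage_label_py := by
  intro l _
  unfold Spec_stage_label_py stage_label_py stage_label_py_alt
  by_cases hnil : l = []
  · simp [hnil]
  · simp only [hnil, if_false, pvFold_eq_chain _ _ le_rfl]
    have h0 : max 0 (pvChain l) = pvChain l := by
      have := pvChain_nonneg l; omega
    rw [h0]
    unfold pvChain
    split_ifs <;> rfl
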